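-- pv_equiv track=rewrite | github.com/ADDY-IN/Hirelynx_Project | app/scoring.py | _infer_required_edu_tier
-- ===== SOURCE A (Python) =====
-- from typing import List, Dict, Any, Optional, Tuple
--
-- def _infer_required_edu_tier(job_description: str, responsibilities: List[str]) -> int:
--     """
--     Infer the minimum education tier the job implicitly requires based on
--     keywords in its description or responsibilities.
--     Returns 0 if no education requirement is detectable (score will be 100).
--     """
--     text = (job_description + " " + " ".join(responsibilities)).lower()
--     if any(kw in text for kw in ["phd", "doctorate", "doctoral"]):
--         return 6
--     if any(kw in text for kw in ["master's", "masters degree", "mba", "m.sc", "m.eng"]):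
--         return 5
--     if any(kw in text for kw in ["bachelor", "degree required", "undergraduate",
--                                    "b.sc", "b.tech", "b.eng", "b.com"]):
--         return 4
--     if any(kw in text for kw in ["diploma", "college diploma", "certificate required",
--                                    "trade certificate", "red seal", "journeyman"]):
--         return 2
--     return 0  # no education requirement detectable
-- ===== SOURCE B (Python) =====
-- from typing import List
--
-- _TIERS = [
--     (6, ["phd", "doctorate", "doctoral"]),
--     (5, ["master's", "masters degree", "mba", "m.sc", "m.eng"]),
--     (4, ["bachelor", "degree required", "undergraduate",
--          "b.sc", "b.tech", "b.eng", "b.com"]),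
--     (2, ["diploma", "college diploma", "certificate required",
--          "trade certificate", "red seal", "journeyman"]),
-- ]
--
-- def _infer_required_edu_tier(job_description: str, responsibilities: List[str]) -> int:
--     text = (job_description + " " + " ".join(responsibilities)).lower()
--     matched = [tier for tier, kws in _TIERS if any(kw in text for kw in kws)]
--     return max(matched, default=0)
-- ===== Notes on version B (the rewrite author's own statement) =====
-- stated objective: alternative
-- what changed: Replaced the early-return if-cascade with a data-driven tier/keyword table: collect every tier whose keywords match and return the maximum (default 0), relying on the cascade's priority order equalling the numeric tier order.
import Mathlib
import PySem

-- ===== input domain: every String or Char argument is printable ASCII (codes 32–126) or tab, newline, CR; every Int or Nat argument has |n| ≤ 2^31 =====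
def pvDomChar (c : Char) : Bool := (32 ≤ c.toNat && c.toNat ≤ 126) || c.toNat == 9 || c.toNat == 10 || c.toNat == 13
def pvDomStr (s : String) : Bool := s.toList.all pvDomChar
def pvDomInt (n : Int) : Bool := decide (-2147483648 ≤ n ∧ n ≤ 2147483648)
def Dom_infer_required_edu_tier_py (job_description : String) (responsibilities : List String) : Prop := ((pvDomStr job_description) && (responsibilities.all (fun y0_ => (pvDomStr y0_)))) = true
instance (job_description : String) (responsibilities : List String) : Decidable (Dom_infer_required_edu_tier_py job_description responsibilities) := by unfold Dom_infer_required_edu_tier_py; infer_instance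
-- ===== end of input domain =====

-- B replaces A's early-return if-cascade by a tier/keyword table: collect all matched tiers, return their maximum (default 0).

-- ===== PORT A =====
def infer_required_edu_tier_py (job_description : String) (responsibilities : List String) : Int :=
  let text := PySem.Str.lower (job_description ++ " " ++ PySem.Str.join " " responsibilities)
  if (["phd", "doctorate", "doctoral"]).any (fun kw => PySem.Str.isIn kw text) then 6
  else if (["master's", "masters degree", "mba", "m.sc", "m.eng"]).any (fun kw => PySem.Str.isIn kw text) then 5
  else if (["bachelor", "degree required", "undergraduate", "b.sc", "b.tech", "b.eng", "b.com"]).any (fun kw => PySem.Str.isIn kw text) then 4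
  else if (["diploma", "college diploma", "certificate required", "trade certificate", "red seal", "journeyman"]).any (fun kw => PySem.Str.isIn kw text) then 2
  else 0

-- ===== PORT B =====
def pvTiers : List (Int × List String) :=
  [ (6, ["phd", "doctorate", "doctoral"]),
    (5, ["master's", "masters degree", "mba", "m.sc", "m.eng"]),
    (4, ["bachelor", "degree required", "undergraduate", "b.sc", "b.tech", "b.eng", "b.com"]),
    (2, ["diploma", "college diploma", "certificate required", "trade certificate", "red seal", "journeyman"]) ]

def infer_required_edu_tier_py_alt (job_description : String) (responsibilities : List String) : Int :=
  let text := PySem.Str.lower (job_description ++ " " ++ PySem.Str.join " " responsibilities)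
  let matched := (pvTiers.filter (fun p => p.2.any (fun kw => PySem.Str.isIn kw text))).map (fun p => p.1)
  (PySem.List.max? matched (fun x => x)).getD 0

-- ===== PRECONDITION & SPEC =====
def Spec_infer_required_edu_tier_py (job_description : String) (responsibilities : List String) (out : Int) : Prop := out = infer_required_edu_tier_py_alt job_description responsibilities
instance (job_description : String) (responsibilities : List String) (out : Int) : Decidable (Spec_infer_required_edu_tier_py job_description responsibilities out) := by unfold Spec_infer_required_edu_tier_py; infer_instance

-- ===== CLAIM (what is proved, stated in full; the proofs are below) =====
def Claim_equal_infer_required_edu_tier_py : Prop := ∀ (job_description : String) (responsibilities : List String), Dom_infer_required_edu_tier_py job_description responsibilities → Spec_infer_required_edu_tier_py job_description responsibilities (infer_required_edu_tier_py job_description responsibilities)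

-- ===== LEMMAS AND PROOFS =====

-- For ANY text, the cascade equals the collect-then-max over the table.
theorem pv_core_eq (text : String) :
    (if (["phd", "doctorate", "doctoral"]).any (fun kw => PySem.Str.isIn kw text) then (6 : Int)
     else if (["master's", "masters degree", "mba", "m.sc", "m.eng"]).any (fun kw => PySem.Str.isIn kw text) then 5
     else if (["bachelor", "degree required", "undergraduate", "b.sc", "b.tech", "b.eng", "b.com"]).any (fun kw => PySem.Str.isIn kw text) then 4
     else if (["diploma", "college diploma", "certificate required", "trade certificate", "red seal", "journeyman"]).any (fun kw => PySem.Str.isIn kw text) then 2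
     else 0)
    = (PySem.List.max? ((pvTiers.filter (fun p => p.2.any (fun kw => PySem.Str.isIn kw text))).map (fun p => p.1)) (fun x => x)).getD 0 := by
  by_cases h6 : (["phd", "doctorate", "doctoral"]).any (fun kw => PySem.Str.isIn kw text) = true <;>
  by_cases h5 : (["master's", "masters degree", "mba", "m.sc", "m.eng"]).any (fun kw => PySem.Str.isIn kw text) = true <;>
  by_cases h4 : (["bachelor", "degree required", "undergraduate", "b.sc", "b.tech", "b.eng", "b.com"]).any (fun kw => PySem.Str.isIn kw text) = true <;>
  by_cases h2 : (["diploma", "college diploma", "certificate required", "trade certificate", "red seal", "journeyman"]).any (fun kw => PySem.Str.isIn kw text) = true <;>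
  simp_all [pvTiers, PySem.List.max?]

-- ===== VERDICT (by name: the statement is the Claim_ definition above) =====
theorem infer_required_edu_tier_py_spec : Claim_equal_infer_required_edu_tier_py := by
  intro jd rs _
  unfold Spec_infer_required_edu_tier_py infer_required_edu_tier_py infer_required_edu_tier_py_alt
  exact pv_core_eq _
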